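-- pv_equiv track=rewrite | github.com/AkodLA/python-data-project | src/data_treat.py | combined_filter
-- ===== SOURCE A (Python) =====
-- def filter(dictionnary, value, topic):
--     filtered = {}
--     if topic.lower() == "score":
--         for person in dictionnary:
--             if dictionnary[person] >= value:
--                 filtered[person] = dictionnary[person] #make another dictionnary containing filtered persons based on a minimum score
--     elif topic.lower() == "age":
--         for person in dictionnary:
--             if person[1] <= value:
--                 filtered[person] = dictionnary[person] #make another dictionnary containing filtered persons based on a maximum age
--     return filtered
--
-- def score_filter(dictionnary, minscore):
--     return filter(dictionnary, minscore, "Score")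
--
-- def age_filter(dictionnary, maxage):
--     return filter(dictionnary, maxage, "Age")
--
-- def combined_filter(dictionnary, minscore, maxage):
--     my_list = []
--     score_filtered = score_filter(dictionnary, minscore)
--     age_filtered = age_filter(dictionnary, maxage)
--     for person in dictionnary:
--         if person in score_filtered and person in age_filtered:
--             pers = f"Name: {person[0]}, Age: {person[1]}, Score: {dictionnary[person]}"
--             my_list.append(pers)
--     return my_list
-- ===== SOURCE B (Python) =====
-- def combined_filter(dictionnary, minscore, maxage):
--     return [
--         f"Name: {name}, Age: {age}, Score: {score}"
--         for (name, age), score in dictionnary.items()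
--         if score >= minscore and age <= maxage
--     ]
-- ===== Notes on version B (the rewrite author's own statement) =====
-- stated objective: simpler
-- what changed: One list comprehension over dictionnary.items() testing both conditions on the unpacked (name, age)/score directly; the filter helper, its topic dispatch, the two intermediate filtered dicts and all dict membership/key lookups are gone.
import Mathlib
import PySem

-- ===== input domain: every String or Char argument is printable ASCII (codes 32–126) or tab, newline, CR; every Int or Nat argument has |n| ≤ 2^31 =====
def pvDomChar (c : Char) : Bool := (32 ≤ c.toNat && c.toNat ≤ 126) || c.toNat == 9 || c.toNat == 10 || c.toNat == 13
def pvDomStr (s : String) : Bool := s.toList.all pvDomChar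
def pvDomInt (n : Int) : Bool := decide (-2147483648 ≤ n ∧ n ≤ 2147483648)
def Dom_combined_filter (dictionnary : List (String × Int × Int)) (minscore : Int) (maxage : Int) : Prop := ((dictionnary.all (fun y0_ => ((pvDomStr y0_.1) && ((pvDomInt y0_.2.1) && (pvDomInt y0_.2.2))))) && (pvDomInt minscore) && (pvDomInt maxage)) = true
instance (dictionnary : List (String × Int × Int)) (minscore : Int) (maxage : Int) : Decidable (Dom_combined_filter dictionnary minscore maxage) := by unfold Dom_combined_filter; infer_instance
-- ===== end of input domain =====

-- B replaces A's filter helper, topic dispatch and two intermediate filtered dicts by one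
-- list comprehension over dictionnary.items() testing both conditions directly (objective: simpler).

-- The Python argument is a dict keyed by (name, age); both ports decode the flat triple list
-- into that dict first (dict construction: later duplicate keys overwrite in place).
def pvDictOf (dictionnary : List (String × Int × Int)) : PySem.Dict (String × Int) Int :=
  PySem.Dict.ofList (dictionnary.map (fun y => ((y.1, y.2.1), y.2.2)))

-- ===== PORT A =====
-- filter(dictionnary, value, topic): dictionnary[person] is ported as (d.get? person).getD 0,
-- exact because person is always a key of d during the iteration.
def pvFilterA (d : PySem.Dict (String × Int) Int) (value : Int) (topic : String) :
    PySem.Dict (String × Int) Int :=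
  if PySem.Str.lower topic == "score" then
    d.items.foldl (fun filtered person =>
      if (d.get? person.1).getD 0 ≥ value then
        filtered.insert person.1 ((d.get? person.1).getD 0)
      else filtered) PySem.Dict.empty
  else if PySem.Str.lower topic == "age" then
    d.items.foldl (fun filtered person =>
      if person.1.2 ≤ value then
        filtered.insert person.1 ((d.get? person.1).getD 0)
      else filtered) PySem.Dict.empty
  else PySem.Dict.empty

def score_filterA (d : PySem.Dict (String × Int) Int) (minscore : Int) : PySem.Dict (String × Int) Int :=
  pvFilterA d minscore "Score"

def age_filterA (d : PySem.Dict (String × Int) Int) (maxage : Int) : PySem.Dict (String × Int) Int :=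
  pvFilterA d maxage "Age"

def combined_filter (dictionnary : List (String × Int × Int)) (minscore : Int) (maxage : Int) : List String :=
  let d := pvDictOf dictionnary
  let score_filtered := score_filterA d minscore
  let age_filtered := age_filterA d maxage
  d.items.foldl (fun my_list person =>
    if score_filtered.contains person.1 && age_filtered.contains person.1 then
      my_list ++ ["Name: " ++ person.1.1 ++ ", Age: " ++ PySem.Int.toStr person.1.2 ++
                  ", Score: " ++ PySem.Int.toStr ((d.get? person.1).getD 0)]
    else my_list) []

-- ===== PORT B =====
def combined_filter_alt (dictionnary : List (String × Int × Int)) (minscore : Int) (maxage : Int) : List String :=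
  (pvDictOf dictionnary).items.filterMap (fun p =>
    if decide (p.2 ≥ minscore) && decide (p.1.2 ≤ maxage) then
      some ("Name: " ++ p.1.1 ++ ", Age: " ++ PySem.Int.toStr p.1.2 ++
            ", Score: " ++ PySem.Int.toStr p.2)
    else none)

-- ===== PRECONDITION & SPEC =====
def Spec_combined_filter (dictionnary : List (String × Int × Int)) (minscore : Int) (maxage : Int) (out : List String) : Prop := out = combined_filter_alt dictionnary minscore maxage
instance (dictionnary : List (String × Int × Int)) (minscore : Int) (maxage : Int) (out : List String) : Decidable (Spec_combined_filter dictionnary minscore maxage out) := by unfold Spec_combined_filter; infer_instance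

-- ===== CLAIM (what is proved, stated in full; the proofs are below) =====
def Claim_equal_combined_filter : Prop := ∀ (dictionnary : List (String × Int × Int)) (minscore : Int) (maxage : Int), Dom_combined_filter dictionnary minscore maxage → Spec_combined_filter dictionnary minscore maxage (combined_filter dictionnary minscore maxage)

-- ===== LEMMAS AND PROOFS =====

-- membership in a dict built by a conditional-insert loop
theorem contains_foldl_if {P : Type} (xs : List P) (f0 : PySem.Dict (String × Int) Int)
    (key : P → String × Int) (val : P → Int) (c : P → Prop) [DecidablePred c] (k : String × Int) :
    (xs.foldl (fun f p => if c p then f.insert (key p) (val p) else f) f0).contains k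
      = (xs.any (fun p => decide (c p) && (k == key p)) || f0.contains k) := by
  induction xs generalizing f0 with
  | nil => simp
  | cons x xs ih =>
    simp only [List.foldl_cons, List.any_cons]
    by_cases hc : c x
    · simp only [if_pos hc, ih, PySem.Dict.contains_insert, decide_eq_true hc, Bool.true_and]
      rw [Bool.eq_iff_iff]
      simp only [Bool.or_eq_true]
      tauto
    · simp [ih, hc]

theorem contains_scoreF (d : PySem.Dict (String × Int) Int) (hn : d.keys.Nodup)
    {k : String × Int} {v : Int} (h : (k, v) ∈ d.items) (minscore : Int) :
    (score_filterA d minscore).contains k = decide (v ≥ minscore) := by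
  have htop : (PySem.Str.lower "Score" == "score") = true := by decide
  rw [score_filterA, pvFilterA, if_pos htop,
    contains_foldl_if d.items PySem.Dict.empty (fun p => p.1)
      (fun p => (d.get? p.1).getD 0) (fun p => (d.get? p.1).getD 0 ≥ minscore) k]
  rw [PySem.Dict.contains_empty, Bool.or_false, Bool.eq_iff_iff]
  simp only [List.any_eq_true, Bool.and_eq_true, decide_eq_true_eq, beq_iff_eq]
  constructor
  · rintro ⟨p, hp, hge, hk⟩
    have h1 : d.get? p.1 = some p.2 := PySem.Dict.get?_of_mem_items d hp hn
    have h2 : d.get? k = some v := PySem.Dict.get?_of_mem_items d h hn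
    rw [hk] at h2; rw [h1] at h2
    simp only [Option.some.injEq] at h2
    rw [h1] at hge; simpa [← h2] using hge
  · intro hv
    refine ⟨(k, v), h, ?_, rfl⟩
    rw [PySem.Dict.get?_of_mem_items d h hn]; simpa using hv

theorem contains_ageF (d : PySem.Dict (String × Int) Int)
    {k : String × Int} {v : Int} (h : (k, v) ∈ d.items) (maxage : Int) :
    (age_filterA d maxage).contains k = decide (k.2 ≤ maxage) := by
  have htop1 : (PySem.Str.lower "Age" == "score") = false := by decide
  have htop2 : (PySem.Str.lower "Age" == "age") = true := by decide
  rw [age_filterA, pvFilterA, if_neg (by simp [htop1]), if_pos htop2,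
    contains_foldl_if d.items PySem.Dict.empty (fun p => p.1)
      (fun p => (d.get? p.1).getD 0) (fun p => p.1.2 ≤ maxage) k]
  rw [PySem.Dict.contains_empty, Bool.or_false, Bool.eq_iff_iff]
  simp only [List.any_eq_true, Bool.and_eq_true, decide_eq_true_eq, beq_iff_eq]
  constructor
  · rintro ⟨p, hp, hle, hk⟩; rw [hk]; exact hle
  · intro hv; exact ⟨(k, v), h, hv, rfl⟩

theorem filterMap_if_eq_map_filter {α β : Type} (c : α → Bool) (g : α → β) (l : List α) :
    l.filterMap (fun p => if c p then some (g p) else none) = (l.filter c).map g := by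
  induction l with
  | nil => rfl
  | cons x xs ih => cases hc : c x <;> simp [hc, ih]

-- ===== VERDICT (by name: the statement is the Claim_ definition above) =====
theorem combined_filter_spec : Claim_equal_combined_filter := by
  intro dictionnary minscore maxage _
  unfold Spec_combined_filter combined_filter combined_filter_alt
  set d := pvDictOf dictionnary with hd
  have hn : d.keys.Nodup := PySem.Dict.nodup_keys_ofList _
  rw [PySem.List.foldl_append_if
        (fun person => (score_filterA d minscore).contains person.1 &&
                       (age_filterA d maxage).contains person.1)
        (fun person => "Name: " ++ person.1.1 ++ ", Age: " ++ PySem.Int.toStr person.1.2 ++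
                       ", Score: " ++ PySem.Int.toStr ((d.get? person.1).getD 0))
        d.items [],
      filterMap_if_eq_map_filter, List.nil_append]
  rw [List.filter_congr (fun p hp => ?_)]
  · apply List.map_congr_left
    intro p hp
    have hpm : p ∈ d.items := (List.mem_filter.mp hp).1
    have : d.get? p.1 = some p.2 := PySem.Dict.get?_of_mem_items d hpm hn
    rw [this]; rfl
  · rw [contains_scoreF d hn hp minscore, contains_ageF d hp maxage]
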